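-- pv_equiv track=rewrite | github.com/Radcliffe/OEIS-Python | src/oeispy/A368/A368207_2.py | A368207
-- ===== SOURCE A (Python) =====
-- from math import isqrt
--
-- def A368207(n):
--     c, r = 0, isqrt(n)
--     for w in range(r+1):
--         for x in range(w,r+1):
--             wx = w*x
--             if wx>n:
--                 break
--             for y in range(x+1,r+1):
--                 for z in range(y,n+1):
--                     yz = wx+y*z
--                     if yz>n:
--                         break
--                     if yz==n:
--                         m = 1
--                         if w!=x:
--                             m<<=1
--                         if y!=z:
--                             m<<=1
--                         c+=m
--     return c # _Chai Wah Wu_, Dec 19 2023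
-- ===== SOURCE B (Python) =====
-- from math import isqrt
--
-- def A368207(n):
--     # For each w <= x with w*x <= n, count divisor pairs (y, z) of m = n - w*x
--     # with x < y <= z by trial division up to isqrt(m), weighting 2 per strict
--     # inequality (w != x, y != z).
--     c, r = 0, isqrt(n)
--     for w in range(r + 1):
--         for x in range(w, r + 1):
--             m = n - w * x
--             if m < 0:
--                 break
--             base = 1 if w == x else 2
--             for y in range(x + 1, isqrt(m) + 1):
--                 if m % y == 0:
--                     c += base * (1 if y * y == m else 2)
--     return c
-- ===== Notes on version B (the rewrite author's own statement) =====
-- stated objective: faster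
-- what changed: The brute-force inner double loop over (y, z) with z scanned up to n is replaced by trial division of m = n - w*x up to isqrt(m), counting divisor pairs directly.
import Mathlib
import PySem

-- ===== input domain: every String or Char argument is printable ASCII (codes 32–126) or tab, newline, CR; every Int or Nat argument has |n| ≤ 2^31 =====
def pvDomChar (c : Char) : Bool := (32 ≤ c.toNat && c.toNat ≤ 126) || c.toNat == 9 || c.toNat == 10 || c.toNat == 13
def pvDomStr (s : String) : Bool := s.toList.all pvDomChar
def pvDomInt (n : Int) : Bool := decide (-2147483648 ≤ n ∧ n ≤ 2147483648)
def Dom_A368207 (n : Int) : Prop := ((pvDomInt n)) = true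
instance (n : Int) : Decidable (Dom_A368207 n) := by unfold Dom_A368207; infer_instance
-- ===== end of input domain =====

-- B replaces A's inner brute-force scan over (y, z) by trial division of n - w*x
-- up to its integer square root (objective: faster, asymptotically).

-- math.isqrt, exact for 0 ≤ n (Pre_); Python raises ValueError for n < 0.
def pyIsqrt (n : Int) : Int := (n.toNat.sqrt : Int)

-- ===== PORT A =====
-- innermost loop 'for z in range(y, n+1)' with its break
def zloopA (n wx w x y : Int) : List Int → Int → Int
  | [], c => c
  | z :: zs, c =>
    let yz := wx + y * z
    if yz > n then c
    else if yz = n then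
      let m : Int := 1
      let m := if w ≠ x then m <<< (1 : Nat) else m
      let m := if y ≠ z then m <<< (1 : Nat) else m
      zloopA n wx w x y zs (c + m)
    else zloopA n wx w x y zs c

-- 'for x in range(w, r+1)' with its break
def xloopA (n r w : Int) : List Int → Int → Int
  | [], c => c
  | x :: xs, c =>
    let wx := w * x
    if wx > n then c
    else
      xloopA n r w xs
        ((PySem.List.pyRange (x + 1) (r + 1) 1).foldl
          (fun c y => zloopA n wx w x y (PySem.List.pyRange y (n + 1) 1) c) c)

def A368207 (n : Int) : Int :=
  let r := pyIsqrt n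
  (PySem.List.pyRange 0 (r + 1) 1).foldl
    (fun c w => xloopA n r w (PySem.List.pyRange w (r + 1) 1) c) 0

-- ===== PORT B =====
-- 'for x in range(w, r+1)' with its break; inner loop = trial division of m
def xloopB (n r w : Int) : List Int → Int → Int
  | [], c => c
  | x :: xs, c =>
    let m := n - w * x
    if m < 0 then c
    else
      let base : Int := if w = x then 1 else 2
      xloopB n r w xs
        ((PySem.List.pyRange (x + 1) (pyIsqrt m + 1) 1).foldl
          (fun c y =>
            if PySem.Int.mod m y = 0 then c + base * (if y * y = m then 1 else 2) else c) c)

def A368207_alt (n : Int) : Int :=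
  let r := pyIsqrt n
  (PySem.List.pyRange 0 (r + 1) 1).foldl
    (fun c w => xloopB n r w (PySem.List.pyRange w (r + 1) 1) c) 0

-- ===== PRECONDITION & SPEC =====
-- Python's math.isqrt raises ValueError for negative arguments, so A raises for n < 0.
def Pre_A368207 (n : Int) : Prop := 0 ≤ n
instance (n : Int) : Decidable (Pre_A368207 n) := by unfold Pre_A368207; infer_instance
def pvWitness_A368207 : Int := (16)

def Spec_A368207 (n : Int) (out : Int) : Prop := out = A368207_alt n
instance (n : Int) (out : Int) : Decidable (Spec_A368207 n out) := by unfold Spec_A368207; infer_instance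

-- ===== CLAIM (what is proved, stated in full; the proofs are below) =====
def Claim_equal_A368207 : Prop := ∀ (n : Int), Dom_A368207 n → Pre_A368207 n → Spec_A368207 n (A368207 n)

-- ===== LEMMAS AND PROOFS =====

-- the multiplicity both programs attach to a solution n = w*x + y*z with z = m/y
def pvWeight (w x y m : Int) : Int :=
  (if w = x then 1 else 2) * (if y * y = m then 1 else 2)

theorem pyIsqrt_le_iff {m y : Int} (hm : 0 ≤ m) (hy : 0 ≤ y) :
    y ≤ pyIsqrt m ↔ y * y ≤ m := by
  obtain ⟨a, rfl⟩ := Int.eq_ofNat_of_zero_le hy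
  obtain ⟨b, rfl⟩ := Int.eq_ofNat_of_zero_le hm
  simp only [pyIsqrt, Int.toNat_natCast]
  constructor
  · intro h
    have : a ≤ Nat.sqrt b := by exact_mod_cast h
    have := Nat.le_sqrt.mp this
    exact_mod_cast this
  · intro h
    have : a * a ≤ b := by exact_mod_cast h
    exact_mod_cast Nat.le_sqrt.mpr this

theorem zloopA_eq (n wx w x y m : Int) (hy : 1 ≤ y) (hm : 0 ≤ m) (hmn : m ≤ n)
    (hwx : wx = n - m) :
    ∀ (k : Nat) (a c : Int), (n + 1 - a).toNat = k →
      zloopA n wx w x y (PySem.List.pyRange a (n + 1) 1) c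
        = c + (if a * y ≤ m ∧ y ∣ m then pvWeight w x y m else 0) := by
  intro k
  induction k with
  | zero =>
    intro a c ha
    have hna : n + 1 ≤ a := by omega
    rw [PySem.List.pyRange_one_eq_nil hna]
    rw [zloopA, if_neg]
    · ring
    · rintro ⟨h1, -⟩
      nlinarith
  | succ k ih =>
    intro a c ha
    have hab : a < n + 1 := by omega
    rw [PySem.List.pyRange_one_cons hab, zloopA]
    dsimp only
    by_cases h1 : wx + y * a > n
    · rw [if_pos h1, if_neg]
      · ring
      · rintro ⟨h2, -⟩
        nlinarith [mul_comm a y]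
    · rw [if_neg h1]
      by_cases h2 : wx + y * a = n
      · rw [if_pos h2, ih (a + 1) _ (by omega)]
        have hya : y * a = m := by omega
        have hcond : a * y ≤ m ∧ y ∣ m := ⟨by nlinarith [mul_comm a y], ⟨a, hya.symm⟩⟩
        have hnca : ¬((a + 1) * y ≤ m ∧ y ∣ m) := by rintro ⟨h3, -⟩; nlinarith
        rw [if_neg hnca, if_pos hcond]
        have hiff : y = a ↔ y * y = m := by
          constructor
          · intro h; subst h; linarith [hya]
          · intro h
            have : y * y = y * a := by omega
            exact mul_left_cancel₀ (by omega : y ≠ 0) this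
        unfold pvWeight
        have h2' : (if y * y = m then (1 : Int) else 2) = (if y = a then 1 else 2) := by
          by_cases hyz : y = a
          · rw [if_pos hyz, if_pos (hiff.mp hyz)]
          · rw [if_neg hyz, if_neg (fun h => hyz (hiff.mpr h))]
        rw [h2']
        have hs1 : (1 : Int) <<< (1 : Nat) = 2 := by decide
        have hs2 : (2 : Int) <<< (1 : Nat) = 4 := by decide
        split_ifs <;> (try simp only [hs1, hs2]) <;> omega
      · rw [if_neg h2, ih (a + 1) _ (by omega)]
        have hlt : y * a < m := by omega
        have : ((a + 1) * y ≤ m ∧ y ∣ m) ↔ (a * y ≤ m ∧ y ∣ m) := by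
          constructor
          · rintro ⟨h3, h4⟩
            exact ⟨by nlinarith, h4⟩
          · rintro ⟨h3, h4⟩
            obtain ⟨q, hq⟩ := h4
            have haq : a < q := by nlinarith
            refine ⟨?_, ⟨q, hq⟩⟩
            calc (a + 1) * y ≤ q * y := by nlinarith
              _ = m := by rw [hq]; ring
        rw [if_congr this rfl rfl]

-- the value the y-loop of A adds for a single y (initial z is y)
def pvG (w x y m : Int) : Int := if y * y ≤ m ∧ y ∣ m then pvWeight w x y m else 0

theorem yfoldA_eq (n wx w x m : Int) (hx : 0 ≤ x) (hm : 0 ≤ m) (hmn : m ≤ n)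
    (hwx : wx = n - m) (r : Int) :
    (PySem.List.pyRange (x + 1) (r + 1) 1).foldl
        (fun c y => zloopA n wx w x y (PySem.List.pyRange y (n + 1) 1) c) c
      = c + ((PySem.List.pyRange (x + 1) (r + 1) 1).map (pvG w x · m)).sum := by
  have hbody : ∀ (acc : Int), ∀ y ∈ PySem.List.pyRange (x + 1) (r + 1) 1,
      zloopA n wx w x y (PySem.List.pyRange y (n + 1) 1) acc = acc + pvG w x y m := by
    intro acc y hy
    rw [PySem.List.mem_pyRange_one] at hy
    have hy1 : 1 ≤ y := by omega
    rw [zloopA_eq n wx w x y m hy1 hm hmn hwx (n + 1 - y).toNat y acc rfl]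
    rfl
  rw [PySem.List.foldl_congr_mem _ _ _ _ hbody, PySem.List.foldl_add]

theorem yfoldB_eq (w x m : Int) (hx : 0 ≤ x) (hm : 0 ≤ m) (c : Int) :
    (PySem.List.pyRange (x + 1) (pyIsqrt m + 1) 1).foldl
        (fun c y =>
          if PySem.Int.mod m y = 0 then c + (if w = x then 1 else 2) * (if y * y = m then 1 else 2) else c) c
      = c + ((PySem.List.pyRange (x + 1) (pyIsqrt m + 1) 1).map (pvG w x · m)).sum := by
  have hbody : ∀ (acc : Int), ∀ y ∈ PySem.List.pyRange (x + 1) (pyIsqrt m + 1) 1,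
      (if PySem.Int.mod m y = 0 then acc + (if w = x then 1 else 2) * (if y * y = m then 1 else 2) else acc)
        = acc + pvG w x y m := by
    intro acc y hy
    rw [PySem.List.mem_pyRange_one] at hy
    have hy0 : 0 ≤ y := by omega
    have hsq : y * y ≤ m := (pyIsqrt_le_iff hm hy0).mp (by omega)
    simp only [PySem.Int.mod_eq_zero_iff_dvd]
    unfold pvG pvWeight
    by_cases hd : y ∣ m
    · rw [if_pos hd, if_pos (show y * y ≤ m ∧ y ∣ m from ⟨hsq, hd⟩)]
    · rw [if_neg hd, if_neg (by rintro ⟨-, h⟩; exact hd h)]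
      ring
  rw [PySem.List.foldl_congr_mem _ _ _ _ hbody, PySem.List.foldl_add]

theorem sums_eq (w x m r : Int) (hm : 0 ≤ m) (hsr : pyIsqrt m ≤ r) :
    ((PySem.List.pyRange (x + 1) (r + 1) 1).map (pvG w x · m)).sum
      = ((PySem.List.pyRange (x + 1) (pyIsqrt m + 1) 1).map (pvG w x · m)).sum := by
  have hzero : ∀ l : List Int, (∀ y ∈ l, pyIsqrt m < y) → (l.map (pvG w x · m)).sum = 0 := by
    intro l hl
    apply List.sum_eq_zero
    intro v hv
    obtain ⟨y, hy, rfl⟩ := List.mem_map.mp hv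
    have hy0 : 0 ≤ y := le_trans (by unfold pyIsqrt; positivity) (le_of_lt (hl y hy))
    unfold pvG
    rw [if_neg]
    rintro ⟨h1, -⟩
    exact absurd ((pyIsqrt_le_iff hm hy0).mpr h1) (not_le.mpr (hl y hy))
  by_cases hsx : pyIsqrt m ≤ x
  · have h0 : PySem.List.pyRange (x + 1) (pyIsqrt m + 1) 1 = [] :=
      PySem.List.pyRange_one_eq_nil (by omega)
    rw [h0]
    simp only [List.map_nil, List.sum_nil]
    apply hzero
    intro y hy
    rw [PySem.List.mem_pyRange_one] at hy
    omega
  · rw [PySem.List.pyRange_one_append (x + 1) (pyIsqrt m + 1) (r + 1) (by omega) (by omega),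
      List.map_append, List.sum_append]
    rw [hzero (PySem.List.pyRange (pyIsqrt m + 1) (r + 1) 1) ?_, add_zero]
    intro y hy
    rw [PySem.List.mem_pyRange_one] at hy
    omega

theorem xloop_eq (n r w : Int) (hn : 0 ≤ n) (hw : 0 ≤ w) (hr : pyIsqrt n ≤ r) :
    ∀ (l : List Int) (c : Int), (∀ x ∈ l, 0 ≤ x) →
      xloopA n r w l c = xloopB n r w l c := by
  intro l
  induction l with
  | nil => intro c _; rfl
  | cons x xs ih =>
    intro c hall
    have hx : 0 ≤ x := hall x List.mem_cons_self
    rw [xloopA, xloopB]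
    dsimp only
    by_cases hb : w * x > n
    · rw [if_pos hb, if_pos (by omega)]
    · rw [if_neg hb, if_neg (by omega)]
      set m := n - w * x with hm_def
      have hwx0 : 0 ≤ w * x := mul_nonneg hw hx
      have hm : 0 ≤ m := by omega
      have hmn : m ≤ n := by omega
      rw [yfoldA_eq n (w * x) w x m hx hm hmn (by omega) r,
        yfoldB_eq w x m hx hm,
        sums_eq w x m r hm ?_]
      · exact ih _ (fun z hz => hall z (List.mem_cons_of_mem x hz))
      · refine le_trans ?_ hr
        unfold pyIsqrt
        have : m.toNat ≤ n.toNat := by omega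
        exact_mod_cast Nat.sqrt_le_sqrt this

-- ===== VERDICT (by name: the statement is the Claim_ definition above) =====
theorem A368207_spec : Claim_equal_A368207 := by
  intro n _ hn
  unfold Spec_A368207 A368207 A368207_alt
  dsimp only
  refine PySem.List.foldl_congr_mem _ _ _ _ ?_
  intro c w hw
  rw [PySem.List.mem_pyRange_one] at hw
  exact xloop_eq n (pyIsqrt n) w hn hw.1 le_rfl _ c
    (fun x hx => le_trans hw.1 (PySem.List.mem_pyRange_one.mp hx).1)
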